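-- pv_equiv track=rewrite | github.com/robertvanstedum/personal-ai-agents | _NewDomains/language-german/reviewer.py | _pick_next_persona
-- ===== SOURCE A (Python) =====
-- ANCHOR_PERSONA = "Frau Berger"
--
-- def _pick_next_persona(personas: list, progress: dict) -> dict:
--     anchor = next((p for p in personas if p["name"] == ANCHOR_PERSONA), None)
--     recent = progress.get("personas_practiced", [])[-2:]
--     # Non-anchor candidates: avoid last 2 used
--     non_anchor = [p for p in personas if p["name"] != ANCHOR_PERSONA and p["name"] not in recent]
--     if not non_anchor:
--         non_anchor = [p for p in personas if p["name"] != ANCHOR_PERSONA]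
--     # Prefer non-anchor personas not yet practiced at all
--     not_yet = [p for p in non_anchor if p["name"] not in progress.get("personas_practiced", [])]
--     pool = not_yet if not_yet else non_anchor
--     # Anchor is always eligible — return it if it's the only option or pool is empty
--     return pool[0] if pool else anchor
-- ===== SOURCE B (Python) =====
-- ANCHOR_PERSONA = "Frau Berger"
--
-- def _pick_next_persona(personas: list, progress: dict) -> dict:
--     # One pass: track first anchor and best non-anchor by (in-recent, in-practiced) key.
--     practiced = progress.get("personas_practiced", [])
--     recent = practiced[-2:]
--     anchor = None
--     best = None
--     best_key = None
--     for p in personas: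
--         name = p["name"]
--         if name == ANCHOR_PERSONA:
--             if anchor is None:
--                 anchor = p
--         else:
--             key = 2 * (name in recent) + (name in practiced)
--             if best is None or key < best_key:
--                 best = p
--                 best_key = key
--     return best if best is not None else anchor
-- ===== Notes on version B (the rewrite author's own statement) =====
-- stated objective: alternative
-- what changed: A builds successive filtered candidate lists (non-anchor avoiding recent, fallback, then not-yet-practiced) and takes the head; B scans the personas exactly once, tracking the first anchor and the best non-anchor candidate under a (in-recent, in-practiced) priority key with first-index tie-breaking.
import Mathlib
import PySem

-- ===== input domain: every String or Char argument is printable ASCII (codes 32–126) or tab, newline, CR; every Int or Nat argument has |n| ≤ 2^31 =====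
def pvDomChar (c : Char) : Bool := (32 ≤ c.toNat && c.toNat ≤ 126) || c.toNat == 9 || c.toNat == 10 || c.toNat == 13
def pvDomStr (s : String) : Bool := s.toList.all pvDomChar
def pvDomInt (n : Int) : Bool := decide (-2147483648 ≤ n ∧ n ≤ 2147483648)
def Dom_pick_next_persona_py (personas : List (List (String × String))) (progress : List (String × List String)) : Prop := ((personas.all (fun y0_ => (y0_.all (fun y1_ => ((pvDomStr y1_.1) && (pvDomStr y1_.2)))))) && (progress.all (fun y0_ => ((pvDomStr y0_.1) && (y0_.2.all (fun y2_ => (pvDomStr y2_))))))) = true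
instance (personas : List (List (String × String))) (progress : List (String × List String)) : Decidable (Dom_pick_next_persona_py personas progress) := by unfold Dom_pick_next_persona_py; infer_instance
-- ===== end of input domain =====

-- B replaces A's cascade of filtered candidate lists by a single pass that tracks the first anchor
-- and the first non-anchor persona with the minimal (in-recent, in-practiced) key (objective: alternative).

-- ===== PORT A =====
def pvAnchorName : String := "Frau Berger"

-- p["name"] (first-match dict lookup; Pre_ guarantees the key is present, so '' is never read)
def pvName (p : List (String × String)) : String :=
  ((PySem.Dict.mk p).get? "name").getD ""

def pick_next_persona_py (personas : List (List (String × String))) (progress : List (String × List String)) : Option (List (String × String)) :=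
  let anchor := personas.find? (fun p => pvName p == pvAnchorName)
  let practiced := (PySem.Dict.mk progress).getD "personas_practiced" []
  let recent := PySem.List.slice practiced (some (-2)) none
  let non_anchor := personas.filter (fun p => pvName p != pvAnchorName && !(recent.contains (pvName p)))
  let non_anchor2 := if non_anchor.isEmpty then personas.filter (fun p => pvName p != pvAnchorName) else non_anchor
  let not_yet := non_anchor2.filter (fun p => !(practiced.contains (pvName p)))
  let pool := if not_yet.isEmpty then non_anchor2 else not_yet
  match pool with
  | [] => anchor
  | q :: _ => some q

-- ===== PORT B =====
def pvKey (recent practiced : List String) (name : String) : Nat :=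
  2 * (if recent.contains name then 1 else 0) + (if practiced.contains name then 1 else 0)

def pvStep (recent practiced : List String)
    (st : Option (List (String × String)) × Option (List (String × String) × Nat))
    (p : List (String × String)) :
    Option (List (String × String)) × Option (List (String × String) × Nat) :=
  let name := pvName p
  if name == pvAnchorName then
    if st.1.isNone then (some p, st.2) else st
  else
    let key := pvKey recent practiced name
    match st.2 with
    | none => (st.1, some (p, key))
    | some (_, bk) => if key < bk then (st.1, some (p, key)) else st

def pick_next_persona_py_alt (personas : List (List (String × String))) (progress : List (String × List String)) : Option (List (String × String)) :=
  let practiced := (PySem.Dict.mk progress).getD "personas_practiced" []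
  let recent := PySem.List.slice practiced (some (-2)) none
  let st := personas.foldl (pvStep recent practiced) (none, none)
  match st.2 with
  | some (p, _) => some p
  | none => st.1

-- ===== PRECONDITION & SPEC =====
-- Pre_ excludes exactly the inputs on which the Python A raises KeyError: a persona without a "name" key.
def Pre_pick_next_persona_py (personas : List (List (String × String))) (progress : List (String × List String)) : Prop :=
  ∀ p ∈ personas, ((PySem.Dict.mk p).get? "name").isSome
instance (personas : List (List (String × String))) (progress : List (String × List String)) : Decidable (Pre_pick_next_persona_py personas progress) := by unfold Pre_pick_next_persona_py; infer_instance

def pvWitness_pick_next_persona_py : (List (List (String × String))) × (List (String × List String)) :=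
  ([[("name", "Anna")], [("name", "Frau Berger")]], [("personas_practiced", ["Anna"])])

def Spec_pick_next_persona_py (personas : List (List (String × String))) (progress : List (String × List String)) (out : Option (List (String × String))) : Prop := out = pick_next_persona_py_alt personas progress
instance (personas : List (List (String × String))) (progress : List (String × List String)) (out : Option (List (String × String))) : Decidable (Spec_pick_next_persona_py personas progress out) := by unfold Spec_pick_next_persona_py; infer_instance

-- ===== CLAIM (what is proved, stated in full; the proofs are below) =====
def Claim_equal_pick_next_persona_py : Prop := ∀ (personas : List (List (String × String))) (progress : List (String × List String)), Dom_pick_next_persona_py personas progress → Pre_pick_next_persona_py personas progress → Spec_pick_next_persona_py personas progress (pick_next_persona_py personas progress)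

-- ===== LEMMAS AND PROOFS =====

-- 'keep the accumulator unless the new candidate's key is strictly smaller'
def pvMerge (b x : Option (List (String × String) × Nat)) : Option (List (String × String) × Nat) :=
  match b, x with
  | none, x => x
  | some bv, none => some bv
  | some (q, kb), some (p, k) => if k < kb then some (p, k) else some (q, kb)

-- right-recursive form of B's best-candidate tracking
def pvBestOf (recent practiced : List String) : List (List (String × String)) → Option (List (String × String) × Nat)
  | [] => none
  | p :: t =>
    if pvName p == pvAnchorName then pvBestOf recent practiced t
    else pvMerge (some (p, pvKey recent practiced (pvName p))) (pvBestOf recent practiced t)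

theorem pvMerge_none (b : Option (List (String × String) × Nat)) : pvMerge b none = b := by
  cases b with
  | none => rfl
  | some bv => cases bv; rfl

theorem pvMerge_assoc (b x y : Option (List (String × String) × Nat)) :
    pvMerge (pvMerge b x) y = pvMerge b (pvMerge x y) := by
  rcases b with _ | ⟨q, kb⟩ <;> rcases x with _ | ⟨p, k⟩ <;> rcases y with _ | ⟨r, kr⟩ <;>
    simp only [pvMerge] <;> split_ifs <;> simp only [pvMerge] <;> split_ifs <;>
      first | rfl | (exfalso; omega)

theorem pvFoldl_eq (recent practiced : List String) :
    ∀ (l : List (List (String × String))) (a : Option (List (String × String)))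
      (b : Option (List (String × String) × Nat)),
      l.foldl (pvStep recent practiced) (a, b) =
        (a.or (l.find? (fun p => pvName p == pvAnchorName)), pvMerge b (pvBestOf recent practiced l)) := by
  intro l
  induction l with
  | nil => intro a b; simp [pvBestOf, pvMerge_none]
  | cons p t ih =>
    intro a b
    by_cases h : (pvName p == pvAnchorName) = true
    · have hstep : pvStep recent practiced (a, b) p = (a.or (some p), b) := by
        cases a <;> simp [pvStep, h, Option.or]
      simp only [List.foldl_cons, hstep, ih, List.find?_cons, h, pvBestOf, if_true]
      rw [Option.or_assoc, Option.some_or]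
    · have hstep : pvStep recent practiced (a, b) p =
          (a, pvMerge b (some (p, pvKey recent practiced (pvName p)))) := by
        rcases b with _ | ⟨q, kb⟩
        · simp [pvStep, h, pvMerge]
        · simp only [pvStep, h, Bool.false_eq_true, if_false, pvMerge]
          split_ifs <;> rfl
      simp only [List.foldl_cons, hstep, ih, List.find?_cons, h, pvBestOf, Bool.false_eq_true,
        if_false, pvMerge_assoc]

-- A's cascade, as the chain of first matches it computes
def pvChain (recent practiced : List String) (l : List (List (String × String))) :
    Option (List (String × String)) :=
  (l.find? (fun p => !(practiced.contains (pvName p)) &&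
      (pvName p != pvAnchorName && !(recent.contains (pvName p))))).or
  ((l.find? (fun p => pvName p != pvAnchorName && !(recent.contains (pvName p)))).or
   (l.find? (fun p => pvName p != pvAnchorName)))

theorem pvKey3 (recent practiced : List String) (s : String)
    (hr : recent.contains s = true) (hpr : practiced.contains s = true) :
    pvKey recent practiced s = 3 := by unfold pvKey; rw [hr, hpr]; rfl

theorem pvKey1 (recent practiced : List String) (s : String)
    (hr : recent.contains s = false) (hpr : practiced.contains s = true) :
    pvKey recent practiced s = 1 := by unfold pvKey; rw [hr, hpr]; rfl

theorem pvKey0 (recent practiced : List String) (s : String)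
    (hr : recent.contains s = false) (hpr : practiced.contains s = false) :
    pvKey recent practiced s = 0 := by unfold pvKey; rw [hr, hpr]; rfl

-- keys of the elements delivered by the three find?s of pvChain
theorem pvFindK0_key (recent practiced : List String) {t : List (List (String × String))}
    {q : List (String × String)}
    (h0 : t.find? (fun p => !(practiced.contains (pvName p)) &&
        (pvName p != pvAnchorName && !(recent.contains (pvName p)))) = some q)
    (H : ∀ s : String, recent.contains s = true → practiced.contains s = true) :
    pvKey recent practiced (pvName q) = 0 := by
  have hq := List.find?_some h0
  rcases Bool.and_eq_true_iff.mp hq with ⟨h1, _⟩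
  have hpr : practiced.contains (pvName q) = false := by
    cases hb : practiced.contains (pvName q)
    · rfl
    · rw [hb] at h1; exact absurd h1 (by decide)
  have hr : recent.contains (pvName q) = false := by
    cases hb : recent.contains (pvName q)
    · rfl
    · rw [H _ hb] at hpr; exact absurd hpr (by decide)
  exact pvKey0 recent practiced _ hr hpr

theorem pvFindQ1_key (recent practiced : List String) {t : List (List (String × String))}
    {q : List (String × String)}
    (h0 : t.find? (fun p => !(practiced.contains (pvName p)) &&
        (pvName p != pvAnchorName && !(recent.contains (pvName p)))) = none)
    (h1 : t.find? (fun p => pvName p != pvAnchorName && !(recent.contains (pvName p))) = some q) :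
    pvKey recent practiced (pvName q) = 1 := by
  have hq := List.find?_some h1
  have hr : recent.contains (pvName q) = false := by
    rcases Bool.and_eq_true_iff.mp hq with ⟨_, h2⟩
    cases hb : recent.contains (pvName q)
    · rfl
    · rw [hb] at h2; exact absurd h2 (by decide)
  have hpr : practiced.contains (pvName q) = true := by
    have h2 := List.find?_eq_none.mp h0 q (List.mem_of_find?_eq_some h1)
    cases hb : practiced.contains (pvName q)
    · exfalso; apply h2; show (!(practiced.contains (pvName q)) && _) = true
      rw [hb, hq]; rfl
    · rfl
  exact pvKey1 recent practiced _ hr hpr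

theorem pvFindQA_key (recent practiced : List String) {t : List (List (String × String))}
    {q : List (String × String)}
    (h1 : t.find? (fun p => pvName p != pvAnchorName && !(recent.contains (pvName p))) = none)
    (h2 : t.find? (fun p => pvName p != pvAnchorName) = some q)
    (H : ∀ s : String, recent.contains s = true → practiced.contains s = true) :
    pvKey recent practiced (pvName q) = 3 := by
  have hq := List.find?_some h2
  have hr : recent.contains (pvName q) = true := by
    have h3 := List.find?_eq_none.mp h1 q (List.mem_of_find?_eq_some h2)
    cases hb : recent.contains (pvName q)
    · exfalso; apply h3; show (_ && !(recent.contains (pvName q))) = true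
      rw [hb, hq]; rfl
    · rfl
  exact pvKey3 recent practiced _ hr (H _ hr)

theorem pvBestOf_eq_chain (recent practiced : List String)
    (H : ∀ s : String, recent.contains s = true → practiced.contains s = true)
    (l : List (List (String × String))) :
    pvBestOf recent practiced l =
      (pvChain recent practiced l).map (fun p => (p, pvKey recent practiced (pvName p))) := by
  induction l with
  | nil => simp [pvBestOf, pvChain]
  | cons p t ih =>
    by_cases ha : (pvName p == pvAnchorName) = true
    · have hna : (pvName p != pvAnchorName) = false := by simp [bne, ha]
      simp only [pvBestOf, ha, if_true, ih, pvChain, List.find?_cons, hna, Bool.false_and,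
        Bool.and_false]
    · have hbeq : (pvName p == pvAnchorName) = false := by
        cases hb : (pvName p == pvAnchorName)
        · rfl
        · exact absurd hb ha
      have hna : (pvName p != pvAnchorName) = true := by simp [bne, hbeq]
      have hb0 : pvBestOf recent practiced (p :: t) =
          pvMerge (some (p, pvKey recent practiced (pvName p))) (pvBestOf recent practiced t) := by
        simp only [pvBestOf, hbeq, Bool.false_eq_true, if_false]
      cases hr : recent.contains (pvName p) with
      | true =>
        have hpr : practiced.contains (pvName p) = true := H _ hr
        have hk := pvKey3 recent practiced _ hr hpr
        rw [hb0, ih, hk]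
        simp only [pvChain, List.find?_cons, hpr, hna, hr, Bool.not_true, Bool.and_false]
        rcases h0 : t.find? (fun p => !(practiced.contains (pvName p)) &&
            (pvName p != pvAnchorName && !(recent.contains (pvName p)))) with _ | q
        · rcases h1 : t.find? (fun p => pvName p != pvAnchorName && !(recent.contains (pvName p))) with _ | q
          · rcases h2 : t.find? (fun p => pvName p != pvAnchorName) with _ | q
            · simp [Option.or, pvMerge, hk]
            · have hkq := pvFindQA_key recent practiced h1 h2 H
              simp [Option.or, pvMerge, hkq, hk]
          · have hkq := pvFindQ1_key recent practiced h0 h1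
            simp [Option.or, pvMerge, hkq, hk]
        · have hkq := pvFindK0_key recent practiced h0 H
          simp [Option.or, pvMerge, hkq, hk]
      | false =>
        cases hpr : practiced.contains (pvName p) with
        | true =>
          have hk := pvKey1 recent practiced _ hr hpr
          rw [hb0, ih, hk]
          simp only [pvChain, List.find?_cons, hpr, hna, hr, Bool.not_true, Bool.not_false,
            Bool.false_and, Bool.and_true, Bool.and_self]
          rcases h0 : t.find? (fun p => !(practiced.contains (pvName p)) &&
              (pvName p != pvAnchorName && !(recent.contains (pvName p)))) with _ | q
          · rcases h1 : t.find? (fun p => pvName p != pvAnchorName && !(recent.contains (pvName p))) with _ | q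
            · rcases h2 : t.find? (fun p => pvName p != pvAnchorName) with _ | q
              · simp [Option.or, pvMerge, hk]
              · have hkq := pvFindQA_key recent practiced h1 h2 H
                simp [Option.or, pvMerge, hkq, hk]
            · have hkq := pvFindQ1_key recent practiced h0 h1
              simp [Option.or, pvMerge, hkq, hk]
          · have hkq := pvFindK0_key recent practiced h0 H
            simp [Option.or, pvMerge, hkq, hk]
        | false =>
          have hk := pvKey0 recent practiced _ hr hpr
          rw [hb0, ih, hk]
          simp only [pvChain, List.find?_cons, hpr, hna, hr, Bool.not_false, Bool.and_self]
          rcases hct : ((t.find? (fun p => !(practiced.contains (pvName p)) &&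
              (pvName p != pvAnchorName && !(recent.contains (pvName p))))).or
            ((t.find? (fun p => pvName p != pvAnchorName && !(recent.contains (pvName p)))).or
             (t.find? (fun p => pvName p != pvAnchorName)))) with _ | q
          · simp [Option.or, pvMerge, hk]
          · simp [Option.or, pvMerge, hk]

theorem pvPool_head_eq_chain (recent practiced : List String)
    (H : ∀ s : String, recent.contains s = true → practiced.contains s = true)
    (l : List (List (String × String))) :
    (if ((if (l.filter (fun p => pvName p != pvAnchorName && !(recent.contains (pvName p)))).isEmpty
          then l.filter (fun p => pvName p != pvAnchorName)
          else l.filter (fun p => pvName p != pvAnchorName && !(recent.contains (pvName p)))).filter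
            (fun p => !(practiced.contains (pvName p)))).isEmpty
     then (if (l.filter (fun p => pvName p != pvAnchorName && !(recent.contains (pvName p)))).isEmpty
           then l.filter (fun p => pvName p != pvAnchorName)
           else l.filter (fun p => pvName p != pvAnchorName && !(recent.contains (pvName p))))
     else (if (l.filter (fun p => pvName p != pvAnchorName && !(recent.contains (pvName p)))).isEmpty
           then l.filter (fun p => pvName p != pvAnchorName)
           else l.filter (fun p => pvName p != pvAnchorName && !(recent.contains (pvName p)))).filter
             (fun p => !(practiced.contains (pvName p)))).head?
    = pvChain recent practiced l := by
  by_cases hna : (l.filter (fun p => pvName p != pvAnchorName && !(recent.contains (pvName p)))).isEmpty = true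
  · -- no non-anchor avoids the recent two: fall back to all non-anchor; not_yet is then empty
    have hq1 : ∀ x ∈ l, ¬ (pvName x != pvAnchorName && !(recent.contains (pvName x))) = true := by
      rw [List.isEmpty_iff] at hna
      exact List.filter_eq_nil_iff.mp hna
    have hny : (l.filter (fun p => pvName p != pvAnchorName)).filter
        (fun p => !(practiced.contains (pvName p))) = [] := by
      rw [List.filter_filter, List.filter_eq_nil_iff]
      intro x hx hcon
      rcases Bool.and_eq_true_iff.mp hcon with ⟨hpx, hnx⟩
      have hpr : practiced.contains (pvName x) = false := by
        cases hb : practiced.contains (pvName x)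
        · rfl
        · rw [hb] at hpx; exact absurd hpx (by decide)
      have hr : recent.contains (pvName x) = false := by
        cases hb : recent.contains (pvName x)
        · rfl
        · rw [H _ hb] at hpr; exact absurd hpr (by decide)
      exact hq1 x hx (by rw [hnx, hr]; decide)
    have hf0 : l.find? (fun p => !(practiced.contains (pvName p)) &&
        (pvName p != pvAnchorName && !(recent.contains (pvName p)))) = none := by
      refine List.find?_eq_none.mpr ?_
      intro x hx h
      exact hq1 x hx (Bool.and_eq_true_iff.mp h).2
    have hf1 : l.find? (fun p => pvName p != pvAnchorName && !(recent.contains (pvName p))) = none :=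
      List.find?_eq_none.mpr hq1
    rw [if_pos hna, hny, if_pos List.isEmpty_nil, List.head?_filter, pvChain, hf0, hf1,
      Option.none_or, Option.none_or]
  · -- some non-anchor avoids the recent two
    rw [if_neg hna, List.filter_filter]
    by_cases h0 : (l.filter (fun p => !(practiced.contains (pvName p)) &&
        (pvName p != pvAnchorName && !(recent.contains (pvName p))))).isEmpty = true
    · have hf0 : l.find? (fun p => !(practiced.contains (pvName p)) &&
          (pvName p != pvAnchorName && !(recent.contains (pvName p)))) = none := by
        refine List.find?_eq_none.mpr ?_
        rw [List.isEmpty_iff] at h0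
        exact List.filter_eq_nil_iff.mp h0
      rw [if_pos h0, List.head?_filter, pvChain, hf0, Option.none_or]
      rcases hf1 : l.find? (fun p => pvName p != pvAnchorName && !(recent.contains (pvName p))) with _ | q
      · exfalso
        rw [← List.head?_filter, List.head?_eq_none_iff, ← List.isEmpty_iff] at hf1
        exact hna hf1
      · rw [Option.some_or]
    · rw [if_neg h0, List.head?_filter, pvChain]
      rcases hf0 : l.find? (fun p => !(practiced.contains (pvName p)) &&
          (pvName p != pvAnchorName && !(recent.contains (pvName p)))) with _ | q
      · exfalso
        rw [← List.head?_filter, List.head?_eq_none_iff, ← List.isEmpty_iff] at hf0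
        exact h0 hf0
      · rw [Option.some_or]

-- ===== VERDICT (by name: the statement is the Claim_ definition above) =====
theorem pick_next_persona_py_spec : Claim_equal_pick_next_persona_py := by
  intro personas progress _ _
  unfold Spec_pick_next_persona_py
  simp only [pick_next_persona_py, pick_next_persona_py_alt]
  set practiced := (PySem.Dict.mk progress).getD "personas_practiced" [] with hprac
  set recent := PySem.List.slice practiced (some (-2)) none with hrec
  have H : ∀ s : String, recent.contains s = true → practiced.contains s = true := by
    intro s hs
    rw [List.contains_iff_mem] at hs ⊢
    exact PySem.List.mem_of_mem_slice practiced (some (-2)) none hs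
  rw [pvFoldl_eq recent practiced personas none none]
  set na1 := personas.filter (fun p => pvName p != pvAnchorName && !(recent.contains (pvName p))) with hna1
  set na2 := (if na1.isEmpty then personas.filter (fun p => pvName p != pvAnchorName) else na1) with hna2
  set ny := na2.filter (fun p => !(practiced.contains (pvName p))) with hny
  set pool := (if ny.isEmpty then na2 else ny) with hpool
  have hph : pool.head? = pvChain recent practiced personas := by
    rw [hpool, hny, hna2, hna1]
    exact pvPool_head_eq_chain recent practiced H personas
  rw [pvBestOf_eq_chain recent practiced H personas]
  rcases hc : pvChain recent practiced personas with _ | q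
  · rw [hc, List.head?_eq_none_iff] at hph
    rw [hph]
    simp [pvMerge, Option.or]
  · rw [hc] at hph
    rcases pool with _ | ⟨q', t⟩
    · simp at hph
    · simp only [List.head?_cons, Option.some.injEq] at hph
      subst hph
      simp [pvMerge]
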